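-- pv_equiv track=rewrite | github.com/ARBML/tkseem | tkseem/util.py | split_on_binary
-- ===== SOURCE A (Python) =====
-- def split_on_binary(word, binary):
--     out = []
--     sub = word[0]
--
--     for i, char in enumerate(word[1:]):
--         if binary[i]:
--             out.append(sub)
--             sub = "##"
--         sub += char
--     out.append(sub)
--
--     return out
-- ===== SOURCE B (Python) =====
-- def split_on_binary(word, binary):
--     # Two-phase: collect cut positions, then slice the word at the boundaries.
--     cuts = [i for i in range(len(word) - 1) if binary[i]]
--     bounds = [0] + [c + 1 for c in cuts] + [len(word)]
--     out = []
--     for start, end in zip(bounds, bounds[1:]):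
--         seg = ''.join(word[start:end])
--         out.append(seg if start == 0 else '##' + seg)
--     return out
-- ===== Notes on version B (the rewrite author's own statement) =====
-- stated objective: alternative
-- what changed: B replaces A's single stateful accumulator pass (growing a 'sub' string character by character) with a two-phase strategy: first compute the cut positions where the mask is truthy and turn them into boundary pairs, then slice the word at those boundaries, marking every non-initial segment with '##'.
import Mathlib
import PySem

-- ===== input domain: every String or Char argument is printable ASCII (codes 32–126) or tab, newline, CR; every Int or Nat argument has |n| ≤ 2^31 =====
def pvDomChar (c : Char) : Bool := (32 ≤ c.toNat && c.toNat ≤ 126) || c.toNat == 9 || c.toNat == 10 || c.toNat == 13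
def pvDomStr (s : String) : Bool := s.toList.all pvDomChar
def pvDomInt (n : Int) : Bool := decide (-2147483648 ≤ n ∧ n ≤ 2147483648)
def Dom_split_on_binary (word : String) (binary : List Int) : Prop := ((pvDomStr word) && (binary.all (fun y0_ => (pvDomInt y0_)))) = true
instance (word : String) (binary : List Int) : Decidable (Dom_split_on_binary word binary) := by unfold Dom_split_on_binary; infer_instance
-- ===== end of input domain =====

-- B builds the result in two phases (cut positions, then boundary slices) instead of A's
-- single accumulator pass; equal cost, different decomposition ("alternative").

-- ===== PORT A =====
def split_on_binary (word : String) (binary : List Int) : List String :=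
  match word.toList with
  | [] => []   -- Python raises IndexError here (word[0]); excluded by Pre_
  | c :: _ =>
    let st := (PySem.List.enumerate (PySem.List.slice word.toList (some 1) none) 0).foldl
      (fun (p : List String × List Char) ic =>
        let q := if PySem.List.pyGetD binary ic.1 0 ≠ 0
                 then (p.1 ++ [String.mk p.2], ['#', '#'])
                 else p
        (q.1, q.2 ++ [ic.2]))
      ([], [c])
    st.1 ++ [String.mk st.2]

-- ===== PORT B =====
def split_on_binary_alt (word : String) (binary : List Int) : List String :=
  let chars := word.toList
  let n := chars.length
  let cuts := (List.range (n - 1)).filter (fun (i : Nat) => PySem.List.pyGetD binary (i : Int) 0 != 0)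
  let bounds := 0 :: (cuts.map (· + 1) ++ [n])
  (bounds.zip bounds.tail).map (fun se =>
    let seg := (chars.drop se.1).take (se.2 - se.1)
    if se.1 = 0 then String.mk seg else String.mk ('#' :: '#' :: seg))

-- ===== PRECONDITION & SPEC =====
-- Pre_ excludes exactly the inputs on which Python A raises IndexError: the empty word
-- (word[0]) and a mask shorter than len(word)-1 (binary[i]).
def Pre_split_on_binary (word : String) (binary : List Int) : Prop :=
  word.toList ≠ [] ∧ word.toList.length ≤ binary.length + 1
instance (word : String) (binary : List Int) : Decidable (Pre_split_on_binary word binary) := by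
  unfold Pre_split_on_binary; infer_instance

def pvWitness_split_on_binary : String × List Int := ("ab", [1])

def Spec_split_on_binary (word : String) (binary : List Int) (out : List String) : Prop := out = split_on_binary_alt word binary
instance (word : String) (binary : List Int) (out : List String) : Decidable (Spec_split_on_binary word binary out) := by unfold Spec_split_on_binary; infer_instance

-- ===== CLAIM (what is proved, stated in full; the proofs are below) =====
def Claim_equal_split_on_binary : Prop := ∀ (word : String) (binary : List Int), Dom_split_on_binary word binary → Pre_split_on_binary word binary → Spec_split_on_binary word binary (split_on_binary word binary)

-- ===== LEMMAS AND PROOFS =====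

-- the common segment structure: split `cs` after the current segment `seg` wherever the
-- head of `bin` is truthy (missing entries read as 0; Pre_ keeps them in range anyway)
def rawGo : List Char → List Char → List Int → List (List Char)
  | seg, [], _ => [seg]
  | seg, ch :: cs, bin =>
    if bin.headD 0 ≠ 0 then seg :: rawGo [ch] cs bin.tail
    else rawGo (seg ++ [ch]) cs bin.tail

-- A's accumulator recursion: like rawGo but every new segment starts with "##"
def goA : List Char → List Char → List Int → List (List Char)
  | seg, [], _ => [seg]
  | seg, ch :: cs, bin =>
    if bin.headD 0 ≠ 0 then seg :: goA ['#', '#', ch] cs bin.tail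
    else goA (seg ++ [ch]) cs bin.tail

def addHH : List (List Char) → List (List Char)
  | [] => []
  | a :: t => a :: t.map (fun s => '#' :: '#' :: s)

def mapFirst (f : List Char → List Char) : List (List Char) → List (List Char)
  | [] => []
  | a :: t => f a :: t

def segsOf (chars : List Char) : List Nat → List (List Char)
  | b1 :: b2 :: bs => (chars.drop b1).take (b2 - b1) :: segsOf chars (b2 :: bs)
  | _ => []

def cutsOf (m : Nat) (bin : List Int) : List Nat :=
  (List.range m).filter (fun i => bin.getD i 0 != 0)

lemma headD_drop (l : List Int) (k : Nat) : (l.drop k).headD 0 = l.getD k 0 := by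
  induction k generalizing l with
  | zero => cases l <;> simp [List.getD]
  | succ k ih => cases l <;> simp [List.getD, ih]

lemma tail_drop' (l : List Int) (k : Nat) : (l.drop k).tail = l.drop (k + 1) := by
  rw [List.tail_drop]

lemma goA_hh (cs : List Char) : ∀ (seg : List Char) (bin : List Int),
    goA ('#' :: '#' :: seg) cs bin = (rawGo seg cs bin).map (fun s => '#' :: '#' :: s) := by
  induction cs with
  | nil => intro seg bin; simp [goA, rawGo]
  | cons ch cs ih =>
    intro seg bin
    cases bin with
    | nil => simpa [goA, rawGo] using ih (seg ++ [ch]) []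
    | cons b bs =>
      by_cases h : b = 0
      · simpa [goA, rawGo, h] using ih (seg ++ [ch]) bs
      · simp [goA, rawGo, h, ih]

lemma goA_eq (cs : List Char) : ∀ (seg : List Char) (bin : List Int),
    goA seg cs bin = addHH (rawGo seg cs bin) := by
  induction cs with
  | nil => intro seg bin; simp [goA, rawGo, addHH]
  | cons ch cs ih =>
    intro seg bin
    cases bin with
    | nil => simpa [goA, rawGo] using ih (seg ++ [ch]) []
    | cons b bs =>
      by_cases h : b = 0
      · simpa [goA, rawGo, h] using ih (seg ++ [ch]) bs
      · simp [goA, rawGo, h, addHH, goA_hh]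

lemma rawGo_prepend (cs : List Char) : ∀ (pre seg : List Char) (bin : List Int),
    rawGo (pre ++ seg) cs bin = mapFirst (pre ++ ·) (rawGo seg cs bin) := by
  induction cs with
  | nil => intro pre seg bin; simp [rawGo, mapFirst]
  | cons ch cs ih =>
    intro pre seg bin
    cases bin with
    | nil => simpa [rawGo, List.append_assoc] using ih pre (seg ++ [ch]) []
    | cons b bs =>
      by_cases h : b = 0
      · simpa [rawGo, h, List.append_assoc] using ih pre (seg ++ [ch]) bs
      · simp [rawGo, h, mapFirst]

-- A's loop computes goA (with the final flush appended)
lemma foldA (cs : List Char) (binary : List Int) :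
    ∀ (k : Nat) (out : List String) (sub : List Char),
    (fun (st : List String × List Char) => st.1 ++ [String.mk st.2])
      ((PySem.List.enumerate cs (k : Int)).foldl
        (fun (p : List String × List Char) ic =>
          let q := if PySem.List.pyGetD binary ic.1 0 ≠ 0
                   then (p.1 ++ [String.mk p.2], ['#', '#'])
                   else p
          (q.1, q.2 ++ [ic.2]))
        (out, sub))
      = out ++ (goA sub cs (binary.drop k)).map String.mk := by
  induction cs with
  | nil => intro k out sub; simp [PySem.List.enumerate, goA]
  | cons ch cs ih =>
    intro k out sub
    rw [PySem.List.enumerate_cons, List.foldl_cons]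
    have hk : ((k : Int) + 1) = ((k + 1 : Nat) : Int) := by push_cast; ring
    have hcond : PySem.List.pyGetD binary (k : Int) 0 = (binary.drop k).headD 0 := by
      simp [PySem.List.pyGetD_natCast, headD_drop]
    simp only [hcond, hk]
    by_cases h : (binary.drop k).headD 0 = 0
    · rw [if_neg (by simpa using h)]
      have h' : binary[k]?.getD 0 = 0 := by
        rw [← List.getD_eq_getElem?_getD, ← headD_drop]; exact h
      simpa [goA, h, h', tail_drop'] using ih (k + 1) out (sub ++ [ch])
    · rw [if_pos (by simpa using h)]
      have h' : ¬ binary[k]?.getD 0 = 0 := by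
        rw [← List.getD_eq_getElem?_getD, ← headD_drop]; exact h
      simpa [goA, h, h', tail_drop'] using ih (k + 1) (out ++ [String.mk sub]) ['#', '#', ch]

lemma cutsOf_succ (m : Nat) (bin : List Int) :
    cutsOf (m + 1) bin
      = (if bin.getD 0 0 ≠ 0 then [0] else []) ++ (cutsOf m bin.tail).map (· + 1) := by
  unfold cutsOf
  rw [List.range_succ_eq_map, List.filter_cons]
  have hmap : ∀ (l : List Nat),
      (l.map (· + 1)).filter (fun i => bin.getD i 0 != 0)
        = (l.filter (fun i => bin.tail.getD i 0 != 0)).map (· + 1) := by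
    intro l
    rw [List.filter_map]
    congr 1
    apply List.filter_congr
    intro i _
    cases bin <;> simp [List.getD]
  simp only [hmap]
  by_cases h0 : bin[0]?.getD 0 = 0 <;> simp [h0]

lemma segsOf_shift (bounds : List Nat) (chars : List Char) (c : Char) :
    segsOf (c :: chars) (bounds.map (· + 1)) = segsOf chars bounds := by
  induction bounds with
  | nil => simp [segsOf]
  | cons b1 bs ih =>
    cases bs with
    | nil => simp [segsOf]
    | cons b2 bs' =>
      simp only [List.map_cons, segsOf, List.drop_succ_cons, Nat.add_sub_add_right,
        List.cons.injEq, true_and]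
      simpa using ih

lemma segsOf_eq_rawGo (rest : List Char) : ∀ (c : Char) (bin : List Int),
    segsOf (c :: rest) (0 :: ((cutsOf rest.length bin).map (· + 1) ++ [rest.length + 1]))
      = rawGo [c] rest bin := by
  induction rest with
  | nil =>
    intro c bin
    simp [cutsOf, segsOf, rawGo]
  | cons ch rs ih =>
    intro c bin
    rw [List.length_cons, cutsOf_succ]
    by_cases h : bin.getD 0 0 ≠ 0
    · -- cut right after c
      have hb : bin.headD 0 ≠ 0 := by cases bin <;> simpa [List.getD] using h
      rw [if_pos h]
      have hshape :
          (0 :: (((([0] ++ (cutsOf rs.length bin.tail).map (· + 1))).map (· + 1)) ++ [rs.length + 1 + 1]))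
            = 0 :: ((0 :: ((cutsOf rs.length bin.tail).map (· + 1) ++ [rs.length + 1])).map (· + 1)) := by
        simp [List.map_map, Function.comp]
      rw [hshape]
      show segsOf (c :: ch :: rs) (0 :: 1 :: _) = _
      rw [segsOf]
      have : segsOf (c :: ch :: rs)
          ((0 :: ((cutsOf rs.length bin.tail).map (· + 1) ++ [rs.length + 1])).map (· + 1))
            = segsOf (ch :: rs) (0 :: ((cutsOf rs.length bin.tail).map (· + 1) ++ [rs.length + 1])) :=
        segsOf_shift _ _ _
      rw [List.map_cons] at this
      rw [this, ih ch bin.tail, rawGo, if_pos hb]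
      simp
    · -- no cut: c and ch stay in one segment
      have hb : ¬ bin.headD 0 ≠ 0 := by cases bin <;> simpa [List.getD] using h
      simp only [h, if_neg, not_false_iff, List.nil_append]
      rw [rawGo, if_neg hb]
      have := ih ch bin.tail
      -- rewrite our bounds as 0 :: map (+1) of the inner bounds' tail
      rcases hcuts : (cutsOf rs.length bin.tail).map (· + 1) ++ [rs.length + 1] with _ | ⟨u, tb⟩
      · exact absurd hcuts (by simp)
      · have houter :
            ((cutsOf rs.length bin.tail).map (· + 1)).map (· + 1) ++ [rs.length + 1 + 1]
              = (u + 1) :: tb.map (· + 1) := by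
          have : ((u :: tb).map (· + 1)) = (u+1) :: tb.map (· + 1) := by simp
          rw [← this, ← hcuts]
          simp [List.map_map, Function.comp]
        rw [houter]
        show segsOf (c :: ch :: rs) (0 :: (u + 1) :: tb.map (· + 1)) = _
        rw [segsOf]
        have hsh : segsOf (c :: ch :: rs) ((u :: tb).map (· + 1)) = segsOf (ch :: rs) (u :: tb) :=
          segsOf_shift _ _ _
        rw [List.map_cons] at hsh
        rw [hsh]
        rw [hcuts, segsOf] at this
        rw [rawGo_prepend rs [c] [ch] bin.tail, ← this]
        simp [mapFirst]

lemma segsOf_append_flag (chars : List Char) :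
    ∀ (t : List Nat), (∀ s ∈ t, s ≠ 0) → t ≠ [] →
    ((0 :: t).zip t).map (fun se =>
        if se.1 = 0 then String.mk ((chars.drop se.1).take (se.2 - se.1))
        else String.mk ('#' :: '#' :: (chars.drop se.1).take (se.2 - se.1)))
      = (addHH (segsOf chars (0 :: t))).map String.mk := by
  intro t ht htne
  rcases t with _ | ⟨u, tb⟩
  · exact absurd rfl htne
  · -- tail: every start lies in u :: tb, hence ≠ 0
    have key : ∀ (xs : List Nat), (∀ s ∈ xs, s ≠ 0) →
          (xs.zip xs.tail).map (fun se =>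
              if se.1 = 0 then String.mk ((chars.drop se.1).take (se.2 - se.1))
              else String.mk ('#' :: '#' :: (chars.drop se.1).take (se.2 - se.1)))
            = (segsOf chars xs).map (fun s => String.mk ('#' :: '#' :: s)) := by
      intro xs hxs
      induction xs with
      | nil => simp [segsOf]
      | cons b1 bs ihx =>
        cases bs with
        | nil => simp [segsOf]
        | cons b2 bs' =>
          simp only [List.tail_cons, List.zip_cons_cons, List.map_cons, segsOf,
            List.cons.injEq]
          refine ⟨by rw [if_neg (hxs b1 (by simp))], ?_⟩
          exact ihx (fun s hs => hxs s (List.mem_cons_of_mem _ hs))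
    have hkey := key (u :: tb) ht
    simp only [List.tail_cons] at hkey
    simp only [List.zip_cons_cons, List.map_cons, segsOf, addHH, hkey, List.map_map]
    simp

-- ===== VERDICT (by name: the statement is the Claim_ definition above) =====
theorem split_on_binary_spec : Claim_equal_split_on_binary := by
  intro word binary _ hpre
  unfold Spec_split_on_binary
  obtain ⟨hne, _⟩ := hpre
  rcases hchars : word.toList with _ | ⟨c, rest⟩
  · exact absurd hchars hne
  · -- A side
    unfold split_on_binary
    rw [hchars]
    simp only []
    have hslice : PySem.List.slice (c :: rest) (some 1) none = rest := by
      simpa using PySem.List.slice_from_one (c :: rest)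
    have hA := foldA rest binary 0 [] [c]
    simp only [Nat.cast_zero, List.drop_zero, List.nil_append] at hA
    simp only [hslice] at *
    rw [hA, goA_eq]
    -- B side
    unfold split_on_binary_alt
    rw [hchars]
    simp only [List.length_cons, Nat.add_sub_cancel]
    have hfilter : (List.range rest.length).filter
        (fun (i : Nat) => PySem.List.pyGetD binary (i : Int) 0 != 0) = cutsOf rest.length binary := by
      unfold cutsOf
      apply List.filter_congr
      intro i _
      simp [PySem.List.pyGetD_natCast]
    rw [hfilter]
    have hflag := segsOf_append_flag (c :: rest)
      ((cutsOf rest.length binary).map (· + 1) ++ [rest.length + 1])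
      (by intro s hs
          rcases List.mem_append.mp hs with h | h
          · obtain ⟨a, _, rfl⟩ := List.mem_map.mp h; omega
          · simp at h; omega)
      (by simp)
    simp only [List.tail_cons] at hflag ⊢
    rw [hflag, segsOf_eq_rawGo]
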